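-- pv_equiv track=rewrite | github.com/ZZZM25/VTRQ | baseline_b_tree/MBT.py | get_trajectory_intersection
-- ===== SOURCE A (Python) =====
-- def get_trajectory_intersection(jingdu_results, weidu_results, shijian_results):
--     """
--     Calculate the intersection of trajectories in three tree query results (based on trace hash)
--     :param jingdu_results: Longitude tree query results
--     :param weidu_results: Latitude tree query results
--     :param shijian_results: Time tree query results
--     :return: Set of intersecting trace hashes
--     """
--     # Extract all trace hashes from each tree query result (deduplicated)
--     jingdu_hashes = set()
--     for _, traces, _ in jingdu_results:
--         jingdu_hashes.update(traces)
--
--     weidu_hashes = set()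
--     for _, traces, _ in weidu_results:
--         weidu_hashes.update(traces)
--
--     shijian_hashes = set()
--     for _, traces, _ in shijian_results:
--         shijian_hashes.update(traces)
--
--     # Calculate the intersection of the three sets
--     intersection_hashes = jingdu_hashes & weidu_hashes & shijian_hashes
--     return intersection_hashes
-- ===== SOURCE B (Python) =====
-- def get_trajectory_intersection(jingdu_results, weidu_results, shijian_results):
--     """
--     Calculate the intersection of trajectories in three tree query results (based on trace hash)
--     Count-to-threshold: tally in how many of the three per-tree hash sets each hash
--     appears, and keep the hashes whose tally is 3.
--     """
--     counts = {}
--     for results in (jingdu_results, weidu_results, shijian_results):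
--         seen = set()
--         for _, traces, _ in results:
--             seen.update(traces)
--         for h in seen:
--             counts[h] = counts.get(h, 0) + 1
--     return {h for h, c in counts.items() if c == 3}
-- ===== Notes on version B (the rewrite author's own statement) =====
-- stated objective: alternative
-- what changed: Instead of building three sets and taking pairwise set intersections (jingdu & weidu & shijian), B tallies in one dict how many of the three per-tree hash sets each hash occurs in and returns the hashes whose tally equals 3.
import Mathlib
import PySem

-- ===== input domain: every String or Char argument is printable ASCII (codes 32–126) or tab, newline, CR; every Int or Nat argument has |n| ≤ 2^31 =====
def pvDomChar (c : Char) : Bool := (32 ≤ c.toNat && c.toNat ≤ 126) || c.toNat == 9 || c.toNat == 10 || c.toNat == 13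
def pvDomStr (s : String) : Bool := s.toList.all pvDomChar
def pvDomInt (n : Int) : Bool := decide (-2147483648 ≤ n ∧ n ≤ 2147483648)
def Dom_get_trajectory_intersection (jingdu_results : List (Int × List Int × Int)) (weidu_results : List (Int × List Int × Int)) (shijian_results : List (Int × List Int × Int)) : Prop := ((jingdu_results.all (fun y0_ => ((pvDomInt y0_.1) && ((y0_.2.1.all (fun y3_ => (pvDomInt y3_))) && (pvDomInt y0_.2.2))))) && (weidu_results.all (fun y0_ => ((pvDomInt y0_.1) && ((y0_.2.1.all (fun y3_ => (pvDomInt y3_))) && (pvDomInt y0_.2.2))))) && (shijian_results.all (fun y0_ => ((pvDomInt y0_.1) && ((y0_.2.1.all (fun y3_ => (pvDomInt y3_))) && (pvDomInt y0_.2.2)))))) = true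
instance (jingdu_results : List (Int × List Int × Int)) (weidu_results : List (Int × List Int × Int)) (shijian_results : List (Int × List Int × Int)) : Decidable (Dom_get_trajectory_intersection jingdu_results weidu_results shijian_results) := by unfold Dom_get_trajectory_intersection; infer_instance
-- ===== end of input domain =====

-- B replaces A's pairwise set intersections by one dict tallying in how many of the
-- three per-tree hash sets each hash occurs, keeping the hashes with tally 3 (alternative decomposition).


-- ===== PORT A =====
-- literal port: build the three deduplicated hash sets, then jingdu & weidu & shijian
def get_trajectory_intersection (jingdu_results : List (Int × List Int × Int)) (weidu_results : List (Int × List Int × Int)) (shijian_results : List (Int × List Int × Int)) : List Int :=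
  let jingdu_hashes : PySem.Set Int :=
    jingdu_results.foldl (fun acc t => PySem.Set.update acc t.2.1) PySem.Set.empty
  let weidu_hashes : PySem.Set Int :=
    weidu_results.foldl (fun acc t => PySem.Set.update acc t.2.1) PySem.Set.empty
  let shijian_hashes : PySem.Set Int :=
    shijian_results.foldl (fun acc t => PySem.Set.update acc t.2.1) PySem.Set.empty
  PySem.Set.inter (PySem.Set.inter jingdu_hashes weidu_hashes) shijian_hashes

-- ===== PORT B =====
-- the per-group 'seen' set of one iteration of B's outer loop
def pvGroupHashes (results : List (Int × List Int × Int)) : PySem.Set Int :=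
  results.foldl (fun acc t => PySem.Set.update acc t.2.1) PySem.Set.empty

-- port of Source B: one dict tallies membership across the three per-group sets; keep tally 3
def get_trajectory_intersection_alt (jingdu_results : List (Int × List Int × Int)) (weidu_results : List (Int × List Int × Int)) (shijian_results : List (Int × List Int × Int)) : List Int :=
  PySem.Set.ofList
    ((([pvGroupHashes jingdu_results, pvGroupHashes weidu_results, pvGroupHashes shijian_results].foldl
        (fun d seen => seen.foldl (fun d h => d.insert h (d.getD h 0 + 1)) d)
        (PySem.Dict.empty : PySem.Dict Int Int)).items.filter (fun p => p.2 == 3)).map Prod.fst)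

-- ===== PRECONDITION & SPEC =====
def Spec_get_trajectory_intersection (jingdu_results : List (Int × List Int × Int)) (weidu_results : List (Int × List Int × Int)) (shijian_results : List (Int × List Int × Int)) (out : List Int) : Prop := out = get_trajectory_intersection_alt jingdu_results weidu_results shijian_results
instance (jingdu_results : List (Int × List Int × Int)) (weidu_results : List (Int × List Int × Int)) (shijian_results : List (Int × List Int × Int)) (out : List Int) : Decidable (Spec_get_trajectory_intersection jingdu_results weidu_results shijian_results out) := by unfold Spec_get_trajectory_intersection; infer_instance

-- ===== CLAIM (what is proved, stated in full; the proofs are below) =====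
def Claim_equal_get_trajectory_intersection : Prop := ∀ (jingdu_results : List (Int × List Int × Int)) (weidu_results : List (Int × List Int × Int)) (shijian_results : List (Int × List Int × Int)), Dom_get_trajectory_intersection jingdu_results weidu_results shijian_results → Spec_get_trajectory_intersection jingdu_results weidu_results shijian_results (get_trajectory_intersection jingdu_results weidu_results shijian_results)

-- ===== LEMMAS AND PROOFS =====

theorem pv_contains_eq (s : List Int) (a : Int) :
    PySem.Set.contains s a = decide (a ∈ s) := by
  simp [PySem.Set.contains]

-- B's per-group set is set(all traces of the group), in first-occurrence order
theorem pvGroupHashes_eq (g : List (Int × List Int × Int)) :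
    pvGroupHashes g = PySem.Set.ofList (g.flatMap (fun t => t.2.1)) := by
  simp only [pvGroupHashes, PySem.Set.ofList, PySem.Set.update, List.foldl_flatMap]

-- folding Set.add over already-present-or-rejected elements does not change the filtered list
theorem pv_filter_foldl_add (p : Int → Bool) :
    ∀ (ys s : List Int), (∀ a ∈ ys, p a = true → a ∈ s) →
      (List.foldl PySem.Set.add s ys).filter p = s.filter p
  | [], _, _ => rfl
  | a :: ys, s, h => by
    rw [List.foldl_cons]
    by_cases hm : a ∈ s
    · have hadd : PySem.Set.add s a = s := by simp [PySem.Set.add, hm]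
      rw [hadd]
      exact pv_filter_foldl_add p ys s (fun b hb => h b (List.mem_cons_of_mem _ hb))
    · have hadd : PySem.Set.add s a = s ++ [a] := by simp [PySem.Set.add, hm]
      have hpa : p a = false := by
        by_contra hh
        exact hm (h a List.mem_cons_self (by simpa using hh))
      rw [hadd, pv_filter_foldl_add p ys (s ++ [a])
        (fun b hb hpb => List.mem_append_left _ (h b (List.mem_cons_of_mem _ hb) hpb))]
      simp [List.filter_append, hpa]

-- folding Set.add over fresh, duplicate-free elements appends them
theorem pv_foldl_add_fresh :
    ∀ (xs s : List Int), xs.Nodup → (∀ a ∈ xs, a ∉ s) →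
      List.foldl PySem.Set.add s xs = s ++ xs
  | [], s, _, _ => by simp
  | a :: xs, s, hnd, hf => by
    have hmem : a ∉ s := hf a List.mem_cons_self
    have hadd : PySem.Set.add s a = s ++ [a] := by
      simp [PySem.Set.add, hmem]
    rw [List.foldl_cons, hadd,
      pv_foldl_add_fresh xs (s ++ [a]) hnd.of_cons
        (fun b hb => by
          simp only [List.mem_append, List.mem_singleton]
          rintro (hbs | rfl)
          · exact hf b (List.mem_cons_of_mem _ hb) hbs
          · exact (List.nodup_cons.mp hnd).1 hb)]
    simp

theorem pv_ofList_self (xs : List Int) (h : xs.Nodup) : PySem.Set.ofList xs = xs := by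
  have := pv_foldl_add_fresh xs [] h (by simp)
  simpa [PySem.Set.ofList, PySem.Set.empty] using this

-- ===== VERDICT (by name: the statement is the Claim_ definition above) =====
theorem get_trajectory_intersection_spec : Claim_equal_get_trajectory_intersection := by
  intro j w sj _
  unfold Spec_get_trajectory_intersection
  set J : List Int := pvGroupHashes j with hJ
  set W : List Int := pvGroupHashes w with hW
  set S : List Int := pvGroupHashes sj with hS
  have hJnd : J.Nodup := by rw [hJ, pvGroupHashes_eq]; exact PySem.Set.nodup_ofList _
  have hWnd : W.Nodup := by rw [hW, pvGroupHashes_eq]; exact PySem.Set.nodup_ofList _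
  have hSnd : S.Nodup := by rw [hS, pvGroupHashes_eq]; exact PySem.Set.nodup_ofList _
  -- the A side is a double filter over J
  have hA : get_trajectory_intersection j w sj
      = J.filter (fun a => PySem.Set.contains S a && PySem.Set.contains W a) := by
    show PySem.Set.inter (PySem.Set.inter J W) S
      = J.filter (fun a => PySem.Set.contains S a && PySem.Set.contains W a)
    simp [PySem.Set.inter, List.filter_filter]
  -- the B side: the dict is Counter (J ++ (W ++ S))
  set K : List Int := J ++ (W ++ S) with hK
  have hcounts :
      ([J, W, S] : List (PySem.Set Int)).foldl
        (fun d seen => seen.foldl (fun d h => d.insert h (d.getD h 0 + 1)) d)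
        (PySem.Dict.empty : PySem.Dict Int Int)
      = PySem.Dict.counter K := by
    rw [← PySem.Dict.foldl_insert_getD_add_one_eq_counter, hK]
    simp [List.foldl_append]
  -- counts of nodup lists are membership indicators
  have hcnt : ∀ (L : List Int), L.Nodup → ∀ a : Int,
      List.count a L = if a ∈ L then 1 else 0 := by
    intro L hnd a
    by_cases hm : a ∈ L
    · simp [hm, List.count_eq_one_of_mem hnd hm]
    · simp [hm, List.count_eq_zero.mpr hm]
  -- the tally-3 predicate (over K) characterised
  set q : Int → Bool := fun k => ((List.count k K : Int) == 3) with hq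
  have hq3 : ∀ a : Int, q a = true ↔ a ∈ J ∧ a ∈ W ∧ a ∈ S := by
    intro a
    have hsum : List.count a K = List.count a J + (List.count a W + List.count a S) := by
      rw [hK]; simp [List.count_append]
    rw [hq]
    simp only [beq_iff_eq, hsum, hcnt J hJnd a, hcnt W hWnd a, hcnt S hSnd a]
    by_cases h1 : a ∈ J <;> by_cases h2 : a ∈ W <;> by_cases h3 : a ∈ S <;>
      simp [h1, h2, h3]
  have hB : get_trajectory_intersection_alt j w sj = J.filter q := by
    simp only [get_trajectory_intersection_alt, ← hJ, ← hW, ← hS]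
    rw [hcounts, PySem.Dict.items_counter]
    rw [List.filter_map, List.map_map]
    have hmapfst : (Prod.fst ∘ fun k : Int => (k, (List.count k K : Int))) = id := rfl
    have hcomp : ((fun p : Int × Int => p.2 == 3) ∘ fun k : Int => (k, (List.count k K : Int))) = q := rfl
    rw [hmapfst, hcomp, List.map_id]
    -- set(K) = foldl add J (W ++ S), since set(J) = J
    have hset : PySem.Set.ofList K = List.foldl PySem.Set.add J (W ++ S) := by
      rw [hK]
      show List.foldl PySem.Set.add PySem.Set.empty (J ++ (W ++ S)) = _
      rw [List.foldl_append]
      congr 1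
      exact pv_ofList_self J hJnd
    rw [hset, pv_filter_foldl_add q (W ++ S) J
      (fun a _ hpa => ((hq3 a).mp hpa).1)]
    exact pv_ofList_self _ (hJnd.filter _)
  rw [hA, hB]
  apply List.filter_congr
  intro a ha
  rw [pv_contains_eq, pv_contains_eq, Bool.eq_iff_iff]
  simp only [Bool.and_eq_true, decide_eq_true_eq, hq3 a]
  tauto
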